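-- pv_equiv track=rewrite | github.com/geoffbeier/aoc_2021 | aoc_2015/day11.py | skip_illegal_letters
-- ===== SOURCE A (Python) =====
-- def skip_illegal_letters(password):
--     r = list(reversed(password))
--     illegal_letters = ["i", "o", "l"]
--     found_illegals = []
--     for c in illegal_letters:
--         if c in r:
--             found_illegals.append(r.index(c))
--     if not found_illegals:
--         return password
--     first_illegal = min(found_illegals)
--     r[first_illegal] = chr(ord(r[first_illegal]) + 1)
--     for i in reversed(range(0, first_illegal)):
--         r[i] = "a"
--     return skip_illegal_letters("".join(reversed(r)))
-- ===== SOURCE B (Python) =====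
-- def skip_illegal_letters(password):
--     for i, c in enumerate(password):
--         if c in "iol":
--             return password[:i] + chr(ord(c) + 1) + "a" * (len(password) - i - 1)
--     return password
-- ===== Notes on version B (the rewrite author's own statement) =====
-- stated objective: simpler
-- what changed: A repeatedly reverses the string, finds the last illegal letter via per-letter index scans, bumps it, blanks the tail and recurses once per illegal letter; B does one forward scan for the first illegal letter and builds the answer directly with a slice, a bumped char and a fill of the tail, no recursion and no reversal.
import Mathlib
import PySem

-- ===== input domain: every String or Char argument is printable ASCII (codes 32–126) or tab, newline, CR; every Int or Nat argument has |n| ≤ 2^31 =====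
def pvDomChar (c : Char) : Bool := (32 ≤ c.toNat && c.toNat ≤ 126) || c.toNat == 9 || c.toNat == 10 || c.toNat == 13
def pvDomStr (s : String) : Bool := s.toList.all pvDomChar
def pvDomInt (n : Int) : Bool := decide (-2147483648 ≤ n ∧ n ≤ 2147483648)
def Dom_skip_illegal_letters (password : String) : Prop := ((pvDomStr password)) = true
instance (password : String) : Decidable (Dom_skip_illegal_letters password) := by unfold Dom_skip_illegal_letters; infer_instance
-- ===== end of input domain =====

-- B replaces A's reverse/index/recursion cascade by a single forward scan that bumps the
-- first illegal letter and fills the rest of the string with the letter a (objective: simpler).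

-- ===== PORT A =====
-- `c in ["i","o","l"]` as a Bool predicate (termination measure of A's recursion; also used by B)
def pvIll (c : Char) : Bool := c == 'i' || c == 'o' || c == 'l'

-- chr(ord(c) + 1)
def pvBump (c : Char) : Char := Char.ofNat (c.toNat + 1)

-- the `for c in illegal_letters: if c in r: found_illegals.append(r.index(c))` loop
def pvFound (r : List Char) : List Nat :=
  ['i', 'o', 'l'].foldl (fun acc c => if c ∈ r then acc ++ [(PySem.List.index? r c).getD 0] else acc) []

-- proof-side name for the list A's body recurses on (definitionally the recursion argument below)
def pvNext (l : List Char) : List Char :=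
  (((List.range ((PySem.List.min? (pvFound l.reverse) (fun x => x)).getD 0)).reverse).foldl
      (fun acc i => acc.set i 'a')
      (l.reverse.set ((PySem.List.min? (pvFound l.reverse) (fun x => x)).getD 0)
        (pvBump (l.reverse.getD ((PySem.List.min? (pvFound l.reverse) (fun x => x)).getD 0) 'a')))).reverse

-- The lemmas from here to pvSkipGo_dec justify termination of A's recursion (each call removes one
-- illegal letter); the port cites pvSkipGo_dec by name, so this chain stays above it.
theorem pvIll_cases {d : Char} (hd : pvIll d = true) : d = 'i' ∨ d = 'o' ∨ d = 'l' := by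
  have := hd; simp [pvIll] at this; tauto

theorem pvFound_mem_iff (r : List Char) (m : Nat) :
    m ∈ pvFound r ↔ ∃ d, pvIll d = true ∧ List.idxOf? d r = some m := by
  have hsome : ∀ c : Char, c ∈ r → List.idxOf? c r = some ((List.idxOf? c r).getD 0) := by
    intro c hc
    rcases Option.isSome_iff_exists.mp (List.isSome_idxOf?.mpr hc) with ⟨k, hk⟩
    simp [hk]
  have expand : pvFound r
      = (if 'i' ∈ r then [(List.idxOf? 'i' r).getD 0] else [])
        ++ (if 'o' ∈ r then [(List.idxOf? 'o' r).getD 0] else [])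
        ++ (if 'l' ∈ r then [(List.idxOf? 'l' r).getD 0] else []) := by
    simp only [pvFound, List.foldl, PySem.List.index?_eq_idxOf?]
    split_ifs <;> simp
  rw [expand]
  constructor
  · intro h
    simp only [List.mem_append, List.mem_ite_nil_right, List.mem_singleton] at h
    rcases h with (⟨hmem, rfl⟩ | ⟨hmem, rfl⟩) | ⟨hmem, rfl⟩
    · exact ⟨'i', by decide, (hsome 'i' hmem).symm ▸ hsome 'i' hmem⟩
    · exact ⟨'o', by decide, (hsome 'o' hmem).symm ▸ hsome 'o' hmem⟩
    · exact ⟨'l', by decide, (hsome 'l' hmem).symm ▸ hsome 'l' hmem⟩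
  · intro ⟨d, hd, hidx⟩
    have hmem : d ∈ r := by
      have := List.isSome_idxOf? (a := d) (l := r); simp [hidx] at this; exact this
    simp only [List.mem_append, List.mem_ite_nil_right, List.mem_singleton]
    rcases pvIll_cases hd with rfl | rfl | rfl <;> simp [hmem, hidx]

theorem pvFound_exists_ill (l : List Char) (h : ¬ pvFound l.reverse = []) :
    ∃ x ∈ l, pvIll x = true := by
  rcases List.exists_mem_of_ne_nil _ h with ⟨m, hm⟩
  rcases (pvFound_mem_iff _ m).mp hm with ⟨d, hd, hidx⟩
  have hdl : d ∈ l := by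
    have := List.isSome_idxOf? (a := d) (l := l.reverse); simp [hidx] at this; exact this
  exact ⟨d, hdl, hd⟩

theorem pvExists_last_decomp (l : List Char) (h : ∃ x ∈ l, pvIll x = true) :
    ∃ pre c suf, l = pre ++ c :: suf ∧ pvIll c = true ∧ ∀ x ∈ suf, pvIll x = false := by
  induction l using List.reverseRecOn with
  | nil => simp at h
  | append_singleton ys y ih =>
    by_cases hy : pvIll y = true
    · exact ⟨ys, y, [], by simp, hy, by simp⟩
    · have h' : ∃ x ∈ ys, pvIll x = true := by
        rcases h with ⟨x, hx, hill⟩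
        rcases List.mem_append.mp hx with hx | hx
        · exact ⟨x, hx, hill⟩
        · simp at hx; subst hx; exact absurd hill hy
      rcases ih h' with ⟨pre, c, suf, rfl, hc, hsuf⟩
      exact ⟨pre, c, suf ++ [y], by simp, hc, by
        intro x hx
        rcases List.mem_append.mp hx with hx | hx
        · exact hsuf x hx
        · simp at hx; subst hx; simpa using hy⟩

theorem pvIdx_last (pre suf : List Char) (c : Char)
    (hsuf : ∀ x ∈ suf, pvIll x = false) (hc : pvIll c = true) :
    List.idxOf? c (suf.reverse ++ c :: pre.reverse) = some suf.length := by
  have hcn : c ∉ suf.reverse := by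
    intro hmem
    have := hsuf c (by simpa using hmem); simp [this] at hc
  have : PySem.List.index? (suf.reverse ++ c :: pre.reverse) c = some suf.length :=
    (PySem.List.index?_eq_some_iff _ _ _).mpr
      ⟨suf.reverse, pre.reverse, rfl, by simp, hcn⟩
  simpa using this

theorem pvMin_first (pre suf : List Char) (c : Char)
    (hsuf : ∀ x ∈ suf, pvIll x = false) (hc : pvIll c = true) :
    (PySem.List.min? (pvFound (suf.reverse ++ c :: pre.reverse)) (fun x => x)).getD 0
      = suf.length := by
  have hk : suf.length ∈ pvFound (suf.reverse ++ c :: pre.reverse) :=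
    (pvFound_mem_iff _ _).mpr ⟨c, hc, pvIdx_last pre suf c hsuf hc⟩
  have hlb : ∀ m ∈ pvFound (suf.reverse ++ c :: pre.reverse), suf.length ≤ m := by
    intro m hm
    rcases (pvFound_mem_iff _ m).mp hm with ⟨d, hd, hidx⟩
    have hidx' : PySem.List.index? (suf.reverse ++ c :: pre.reverse) d = some m := by
      simpa using hidx
    rcases PySem.List.getElem_of_index?_eq_some hidx' with ⟨hmlt, hget, -⟩
    by_contra hlt
    push Not at hlt
    have hm' : m < suf.reverse.length := by simpa using hlt
    have : (suf.reverse ++ c :: pre.reverse)[m] = suf.reverse[m] :=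
      List.getElem_append_left hm'
    have hdm : d ∈ suf := by
      have : suf.reverse[m] = d := by rw [← this, hget]
      have : d ∈ suf.reverse := this ▸ List.getElem_mem hm'
      simpa using this
    have := hsuf d hdm; simp [this] at hd
  rcases hmin : PySem.List.min? (pvFound (suf.reverse ++ c :: pre.reverse)) (fun x => x) with
    _ | m0
  · rw [PySem.List.min?_eq_none_iff] at hmin
    simp [hmin] at hk
  · have h1 : m0 ∈ pvFound (suf.reverse ++ c :: pre.reverse) := PySem.List.min?_mem hmin
    have h2 := PySem.List.min?_isMin hmin suf.length hk
    have h3 := hlb m0 h1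
    simp only [Option.getD_some]
    omega

theorem pvBlank_foldl (xs tail : List Char) :
    ((List.range xs.length).reverse).foldl (fun acc i => acc.set i 'a') (xs ++ tail)
      = List.replicate xs.length 'a' ++ tail := by
  induction xs using List.reverseRecOn generalizing tail with
  | nil => simp
  | append_singleton ys y ih =>
    have hlen : (ys ++ [y]).length = ys.length + 1 := by simp
    rw [hlen, List.range_succ, List.reverse_append, List.reverse_singleton]
    simp only [List.singleton_append, List.foldl_cons]
    have hset : ((ys ++ [y]) ++ tail).set ys.length 'a' = ys ++ 'a' :: tail := by
      rw [List.append_assoc]; simp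
    rw [hset, ih ('a' :: tail)]
    rw [List.replicate_succ']; simp

theorem pvNext_eq (pre suf : List Char) (c : Char)
    (hsuf : ∀ x ∈ suf, pvIll x = false) (hc : pvIll c = true) :
    pvNext (pre ++ c :: suf) = pre ++ pvBump c :: List.replicate suf.length 'a' := by
  have hrev : (pre ++ c :: suf).reverse = suf.reverse ++ c :: pre.reverse := by simp
  rw [pvNext, hrev, pvMin_first pre suf c hsuf hc]
  have hgetD : (suf.reverse ++ c :: pre.reverse).getD suf.length 'a' = c := by
    rw [List.getD_eq_getElem?_getD, List.getElem?_append_right (by simp)]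
    simp
  have hset : (suf.reverse ++ c :: pre.reverse).set suf.length (pvBump c)
      = suf.reverse ++ pvBump c :: pre.reverse := by
    have : suf.length = suf.reverse.length := by simp
    rw [this]; simp
  rw [hgetD, hset]
  have : suf.length = suf.reverse.length := by simp
  rw [this, pvBlank_foldl suf.reverse (pvBump c :: pre.reverse)]
  simp

theorem pvBump_not_ill {c : Char} (hc : pvIll c = true) : pvIll (pvBump c) = false := by
  rcases pvIll_cases hc with rfl | rfl | rfl <;> decide

theorem pvCount_zero {s : List Char} (hs : ∀ x ∈ s, pvIll x = false) : s.countP pvIll = 0 :=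
  List.countP_eq_zero.mpr (by simpa using hs)

theorem pvSkipGo_dec (l : List Char) (h : ¬ pvFound l.reverse = []) :
    (pvNext l).countP pvIll < l.countP pvIll := by
  rcases pvExists_last_decomp l (pvFound_exists_ill l h) with ⟨pre, c, suf, rfl, hc, hsuf⟩
  rw [pvNext_eq pre suf c hsuf hc]
  simp only [List.countP_append, List.countP_cons]
  rw [pvCount_zero hsuf,
    pvCount_zero (s := List.replicate suf.length 'a')
      (fun x hx => by rw [List.eq_of_mem_replicate hx]; rfl)]
  simp [pvBump_not_ill hc, hc]

def skipGo (l : List Char) : List Char :=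
  let r := l.reverse
  let found := pvFound r
  if _h : found = [] then l
  else
    let first := (PySem.List.min? found (fun x => x)).getD 0
    -- r[first_illegal] = chr(ord(r[first_illegal]) + 1)   (first_illegal < len(r): min of valid indices)
    let r1 := r.set first (pvBump (r.getD first 'a'))
    -- for i in reversed(range(0, first_illegal)): r[i] = "a"
    let r2 := ((List.range first).reverse).foldl (fun acc i => acc.set i 'a') r1
    skipGo r2.reverse
termination_by l.countP pvIll
decreasing_by
  simp only [found, r, List.unattach_reverse, List.unattach_attach] at _h ⊢
  exact pvSkipGo_dec l _h

def skip_illegal_letters (password : String) : String := String.ofList (skipGo password.toList)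

-- ===== PORT B =====
-- the forward scan of Source B: the first illegal letter gets bumped, the rest of the string becomes copies of the letter a
def altGo : List Char → List Char
  | [] => []
  | c :: cs => if pvIll c then pvBump c :: List.replicate cs.length 'a' else c :: altGo cs

def skip_illegal_letters_alt (password : String) : String := String.ofList (altGo password.toList)

-- ===== PRECONDITION & SPEC =====
def Spec_skip_illegal_letters (password : String) (out : String) : Prop := out = skip_illegal_letters_alt password
instance (password : String) (out : String) : Decidable (Spec_skip_illegal_letters password out) := by unfold Spec_skip_illegal_letters; infer_instance

-- ===== CLAIM (what is proved, stated in full; the proofs are below) =====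
def Claim_equal_skip_illegal_letters : Prop := ∀ (password : String), Dom_skip_illegal_letters password → Spec_skip_illegal_letters password (skip_illegal_letters password)

-- ===== LEMMAS AND PROOFS =====

theorem pvFound_nil_of_clean (l : List Char) (hclean : ∀ x ∈ l, pvIll x = false) :
    pvFound l.reverse = [] := by
  by_contra h
  rcases pvFound_exists_ill l h with ⟨x, hx, hill⟩
  simp [hclean x hx] at hill

theorem skipGo_clean (l : List Char) (hclean : ∀ x ∈ l, pvIll x = false) : skipGo l = l := by
  unfold skipGo
  simp [pvFound_nil_of_clean l hclean]

theorem pvFound_ne_nil (pre suf : List Char) (c : Char)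
    (hsuf : ∀ x ∈ suf, pvIll x = false) (hc : pvIll c = true) :
    ¬ pvFound ((pre ++ c :: suf).reverse) = [] := by
  intro hnil
  rw [show (pre ++ c :: suf).reverse = suf.reverse ++ c :: pre.reverse from by simp] at hnil
  have hk : suf.length ∈ pvFound (suf.reverse ++ c :: pre.reverse) :=
    (pvFound_mem_iff _ _).mpr ⟨c, hc, pvIdx_last pre suf c hsuf hc⟩
  simp [hnil] at hk

theorem skipGo_step (pre suf : List Char) (c : Char)
    (hsuf : ∀ x ∈ suf, pvIll x = false) (hc : pvIll c = true) :
    skipGo (pre ++ c :: suf) = skipGo (pre ++ pvBump c :: List.replicate suf.length 'a') := by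
  conv_lhs => unfold skipGo
  simp only [dif_neg (pvFound_ne_nil pre suf c hsuf hc)]
  show skipGo (pvNext (pre ++ c :: suf)) = _
  rw [pvNext_eq pre suf c hsuf hc]

theorem altGo_clean (l : List Char) (hclean : ∀ x ∈ l, pvIll x = false) : altGo l = l := by
  induction l with
  | nil => rfl
  | cons c cs ih =>
    rw [altGo]
    rw [if_neg (by simp [hclean c (by simp)])]
    rw [ih (fun x hx => hclean x (by simp [hx]))]

theorem altGo_decomp (pre suf : List Char) (c : Char)
    (hpre : ∀ x ∈ pre, pvIll x = false) (hc : pvIll c = true) :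
    altGo (pre ++ c :: suf) = pre ++ pvBump c :: List.replicate suf.length 'a' := by
  induction pre with
  | nil => simp [altGo, hc]
  | cons p ps ih =>
    have hp : pvIll p = false := hpre p (by simp)
    simp only [List.cons_append, altGo, hp, Bool.false_eq_true, if_false]
    rw [ih (fun x hx => hpre x (by simp [hx]))]

theorem pvExists_first_decomp (l : List Char) (h : ∃ x ∈ l, pvIll x = true) :
    ∃ pre c suf, l = pre ++ c :: suf ∧ pvIll c = true ∧ ∀ x ∈ pre, pvIll x = false := by
  induction l with
  | nil => simp at h
  | cons y ys ih =>
    by_cases hy : pvIll y = true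
    · exact ⟨[], y, ys, rfl, hy, by simp⟩
    · have h' : ∃ x ∈ ys, pvIll x = true := by
        rcases h with ⟨x, hx, hill⟩
        rcases List.mem_cons.mp hx with rfl | hx
        · exact absurd hill hy
        · exact ⟨x, hx, hill⟩
      rcases ih h' with ⟨pre, c, suf, rfl, hc, hpre⟩
      exact ⟨y :: pre, c, suf, rfl, hc, by
        intro x hx
        rcases List.mem_cons.mp hx with rfl | hx
        · simpa using hy
        · exact hpre x hx⟩

theorem skipGo_eq_altGo (l : List Char) : skipGo l = altGo l := by
  generalize hn : l.countP pvIll = n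
  induction n using Nat.strong_induction_on generalizing l with
  | _ n ih =>
    by_cases hex : ∃ x ∈ l, pvIll x = true
    · rcases pvExists_last_decomp l hex with ⟨pre, c, suf, rfl, hc, hsuf⟩
      set l' := pre ++ pvBump c :: List.replicate suf.length 'a' with hl'
      have hcount : l'.countP pvIll < n := by
        rw [hl', ← pvNext_eq pre suf c hsuf hc, ← hn]
        exact pvSkipGo_dec _ (pvFound_ne_nil pre suf c hsuf hc)
      have h1 : skipGo (pre ++ c :: suf) = skipGo l' := skipGo_step pre suf c hsuf hc
      have h2 : skipGo l' = altGo l' := ih _ hcount l' rfl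
      rw [h1, h2]
      by_cases hpre : ∃ x ∈ pre, pvIll x = true
      · rcases pvExists_first_decomp pre hpre with ⟨p1, d, p2, rfl, hd, hp1⟩
        have hA : altGo ((p1 ++ d :: p2) ++ c :: suf)
            = p1 ++ pvBump d :: List.replicate (p2 ++ c :: suf).length 'a' := by
          rw [List.append_assoc, List.cons_append]
          exact altGo_decomp p1 (p2 ++ c :: suf) d hp1 hd
        have hB : altGo l'
            = p1 ++ pvBump d :: List.replicate (p2 ++ pvBump c :: List.replicate suf.length 'a').length 'a' := by
          rw [hl', List.append_assoc, List.cons_append]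
          exact altGo_decomp p1 (p2 ++ pvBump c :: List.replicate suf.length 'a') d hp1 hd
        rw [hA, hB]; simp
      · push Not at hpre
        have hpre' : ∀ x ∈ pre, pvIll x = false := by
          intro x hx; simpa using hpre x hx
        have hclean : ∀ x ∈ l', pvIll x = false := by
          intro x hx
          rw [hl'] at hx
          rcases List.mem_append.mp hx with hx | hx
          · exact hpre' x hx
          · rcases List.mem_cons.mp hx with rfl | hx
            · exact pvBump_not_ill hc
            · rw [List.eq_of_mem_replicate hx]; decide
        rw [altGo_clean l' hclean, altGo_decomp pre suf c hpre' hc, hl']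
    · push Not at hex
      have hclean : ∀ x ∈ l, pvIll x = false := by intro x hx; simpa using hex x hx
      rw [skipGo_clean l hclean, altGo_clean l hclean]

-- ===== VERDICT (by name: the statement is the Claim_ definition above) =====
theorem skip_illegal_letters_spec : Claim_equal_skip_illegal_letters := by
  intro password _
  show skip_illegal_letters password = skip_illegal_letters_alt password
  unfold skip_illegal_letters skip_illegal_letters_alt
  rw [skipGo_eq_altGo]
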